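-- pv_equiv track=rewrite | github.com/sungyeong98/leetcode | 3142-check-if-grid-satisfies-conditions/3142-check-if-grid-satisfies-conditions.py | satisfiesConditions
-- ===== SOURCE A (Python) =====
-- from typing import List
--
-- def satisfiesConditions(grid: List[List[int]]) -> bool:
--     m,n=len(grid),len(grid[0])
--     for i in list(zip(*grid)):
--         if len(set(i))!=1:
--             return False
--     for i in grid:
--         for j in range(n-1):
--             if i[j]==i[j+1]:
--                 return False
--     return True
-- ===== SOURCE B (Python) =====
-- def satisfiesConditions(grid):
--     n = len(grid[0])
--     for i, row in enumerate(grid):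
--         for j in range(n):
--             v = row[j]
--             if i > 0 and grid[i - 1][j] != v:
--                 return False
--             if j > 0 and row[j - 1] == v:
--                 return False
--     return True
-- ===== Notes on version B (the rewrite author's own statement) =====
-- stated objective: simpler
-- what changed: Replaced the two separate passes (a transpose via zip(*grid) with per-column set construction, then a row-adjacency scan) by one fused per-cell scan comparing each cell with the cell above and the cell to its left; no tuple/set allocation.
-- outside the precondition, e.g. on satisfiesConditions([[0], [2], []]): A returns True, B returns False; on satisfiesConditions([[0], [], [0, 2, 0, 1]]): A returns True, B raises IndexError; on satisfiesConditions([[0, 0], [0]]): A returns False, B returns False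
import Mathlib
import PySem

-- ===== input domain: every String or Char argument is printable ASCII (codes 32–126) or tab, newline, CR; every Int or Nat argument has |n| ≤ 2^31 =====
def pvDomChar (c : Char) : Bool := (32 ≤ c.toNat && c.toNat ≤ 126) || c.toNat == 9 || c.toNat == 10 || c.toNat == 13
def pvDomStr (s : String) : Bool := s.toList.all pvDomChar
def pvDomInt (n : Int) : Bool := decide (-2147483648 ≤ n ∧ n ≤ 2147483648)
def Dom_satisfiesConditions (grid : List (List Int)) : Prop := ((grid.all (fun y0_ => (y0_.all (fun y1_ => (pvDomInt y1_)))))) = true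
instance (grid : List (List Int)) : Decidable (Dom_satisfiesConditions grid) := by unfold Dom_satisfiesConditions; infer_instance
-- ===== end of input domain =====

-- B fuses A's two passes (transpose + per-column set, then row-adjacency scan) into one
-- per-cell scan comparing each cell to the cell above and to its left (objective: simpler).

-- ===== PORT A =====
-- zip(*grid): columns up to the shortest row; fuel = len(grid[0]) suffices since the
-- shortest row is no longer than grid[0] plus zip stops at the shortest row anyway.
def pvZipStar (fuel : Nat) (rows : List (List Int)) : List (List Int) :=
  match fuel with
  | 0 => []
  | Nat.succ f =>
    if rows.any (fun r => r.isEmpty) then []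
    else rows.map (fun r => r.headD 0) :: pvZipStar f (rows.map (fun r => r.tail))

def satisfiesConditions (grid : List (List Int)) : Bool :=
  match PySem.List.pyGet? grid 0 with
  | none => false   -- grid[0] raises IndexError on the empty grid; excluded by Pre_
  | some row0 =>
    let n : Int := row0.length
    if (pvZipStar row0.length grid).all (fun c => (PySem.Set.ofList c).length == 1) then
      grid.all (fun i =>
        (PySem.List.pyRange 0 (n - 1) 1).all (fun j =>
          !(PySem.List.pyGetD i j 0 == PySem.List.pyGetD i (j + 1) 0)))
    else false

-- ===== PORT B =====
def satisfiesConditions_alt (grid : List (List Int)) : Bool :=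
  match PySem.List.pyGet? grid 0 with
  | none => false   -- n = len(grid[0]) raises IndexError on the empty grid; excluded by Pre_
  | some row0 =>
    (PySem.List.enumerate grid 0).all (fun p =>
      (PySem.List.pyRange 0 (row0.length : Int) 1).all (fun j =>
        (!(decide (0 < p.1)) || (PySem.List.pyGetD (PySem.List.pyGetD grid (p.1 - 1) []) j 0 == PySem.List.pyGetD p.2 j 0)) &&
        (!(decide (0 < j)) || !(PySem.List.pyGetD p.2 (j - 1) 0 == PySem.List.pyGetD p.2 j 0))))

-- ===== PRECONDITION & SPEC =====
-- Pre_ excludes the empty grid (grid[0] raises IndexError in A) and grids with a row shorter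
-- than the first row — outside the problem's rectangular domain — where A either raises an
-- IndexError in its second pass or returns a value shaped by zip's accidental truncation.
def Pre_satisfiesConditions (grid : List (List Int)) : Prop :=
  grid ≠ [] ∧ ∀ r ∈ grid, (grid.headD []).length ≤ r.length
instance (grid : List (List Int)) : Decidable (Pre_satisfiesConditions grid) := by
  unfold Pre_satisfiesConditions; infer_instance

def pvWitness_satisfiesConditions : List (List Int) := [[1, 2], [1, 2]]

def Spec_satisfiesConditions (grid : List (List Int)) (out : Bool) : Prop := out = satisfiesConditions_alt grid
instance (grid : List (List Int)) (out : Bool) : Decidable (Spec_satisfiesConditions grid out) := by unfold Spec_satisfiesConditions; infer_instance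

-- ===== CLAIM (what is proved, stated in full; the proofs are below) =====
def Claim_equal_satisfiesConditions : Prop := ∀ (grid : List (List Int)), Dom_satisfiesConditions grid → Pre_satisfiesConditions grid → Spec_satisfiesConditions grid (satisfiesConditions grid)

-- ===== LEMMAS AND PROOFS =====

def Qgrid (grid : List (List Int)) (n : Nat) : Prop :=
  ∀ (i : Nat) (hi : i < grid.length), ∀ j < n,
    (0 < i → grid[i].getD j 0 = (grid[i-1]'(by omega)).getD j 0) ∧
    (0 < j → grid[i].getD j 0 ≠ grid[i].getD (j-1) 0)

theorem altB_iff (r : List Int) (t : List (List Int))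
    (h2 : ∀ row ∈ r :: t, r.length ≤ row.length) :
    satisfiesConditions_alt (r :: t) = true ↔ Qgrid (r :: t) r.length := by
  unfold satisfiesConditions_alt Qgrid
  rw [PySem.List.pyGet?_zero_cons]
  simp only [List.all_eq_true, PySem.List.mem_enumerate_iff]
  constructor
  · intro h i hi j hj
    have hlen : r.length ≤ (r :: t)[i].length := h2 _ (List.getElem_mem hi)
    have hmem : ((j : Nat) : Int) ∈ PySem.List.pyRange 0 (r.length : Int) 1 := by
      rw [PySem.List.mem_pyRange_one]; omega
    have hmain := h (↑i, (r :: t)[i]) ⟨i, hi, by simp⟩ ↑j hmem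
    dsimp only at hmain
    simp only [Bool.and_eq_true, Bool.or_eq_true, Bool.not_eq_true', decide_eq_false_iff_not,
      beq_iff_eq, beq_eq_false_iff_ne, ne_eq, not_lt] at hmain
    obtain ⟨hcol, hrow⟩ := hmain
    refine ⟨fun hip => ?_, fun hjp => ?_⟩
    · rcases hcol with hc | hc
      · omega
      · have e1 : ((i:Int) - 1) = ((i-1 : Nat) : Int) := by omega
        rw [e1, PySem.List.pyGetD_natCast, PySem.List.pyGetD_natCast,
          PySem.List.pyGetD_natCast] at hc
        have e2 : (r :: t).getD (i-1) [] = (r :: t)[i-1]'(by omega) :=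
          List.getD_eq_getElem _ _ (by omega)
        rw [e2] at hc
        exact hc.symm
    · rcases hrow with hc | hc
      · omega
      · have e1 : ((j:Int) - 1) = ((j-1 : Nat) : Int) := by omega
        rw [e1, PySem.List.pyGetD_natCast, PySem.List.pyGetD_natCast] at hc
        exact fun hEq => hc hEq.symm
  · intro hq p hp x hx
    obtain ⟨i, hi, rfl⟩ := hp
    rw [PySem.List.mem_pyRange_one] at hx
    obtain ⟨k, rfl⟩ : ∃ kk : Nat, x = (kk : Int) := ⟨x.toNat, by omega⟩
    have hk : k < r.length := by omega
    have hq' := hq i hi k hk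
    dsimp only
    simp only [Bool.and_eq_true, Bool.or_eq_true, Bool.not_eq_true', decide_eq_false_iff_not,
      beq_iff_eq, beq_eq_false_iff_ne, ne_eq, not_lt, zero_add]
    constructor
    · rcases Nat.eq_zero_or_pos i with h0 | hip
      · exact Or.inl (by omega)
      · refine Or.inr ?_
        have e1 : ((i:Int) - 1) = ((i-1 : Nat) : Int) := by omega
        rw [e1, PySem.List.pyGetD_natCast, PySem.List.pyGetD_natCast, PySem.List.pyGetD_natCast]
        have e2 : (r :: t).getD (i-1) [] = (r :: t)[i-1]'(by omega) :=
          List.getD_eq_getElem _ _ (by omega)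
        rw [e2]
        exact (hq'.1 hip).symm
    · rcases Nat.eq_zero_or_pos k with h0 | hkp
      · exact Or.inl (by omega)
      · refine Or.inr ?_
        have e1 : ((k:Int) - 1) = ((k-1 : Nat) : Int) := by omega
        rw [e1, PySem.List.pyGetD_natCast, PySem.List.pyGetD_natCast]
        exact fun hEq => (hq'.2 hkp) hEq.symm

theorem zipStar_rect (n : Nat) : ∀ (rows : List (List Int)), (∀ r ∈ rows, n ≤ r.length) →
    pvZipStar n rows = (List.range n).map (fun j => rows.map (fun r => r.getD j 0)) := by
  induction n with
  | zero => intro rows h; simp [pvZipStar]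
  | succ m ih =>
    intro rows h
    have hne : rows.any (fun r => r.isEmpty) = false := by
      simp only [List.any_eq_false]
      intro r hr
      have := h r hr
      cases r with
      | nil => simp only [List.length_nil] at this; omega
      | cons a t => simp
    rw [pvZipStar, hne]
    simp only [Bool.false_eq_true, if_false]
    rw [ih (rows.map (fun r => r.tail)) (by
      intro r hr; obtain ⟨s, hs, rfl⟩ := List.mem_map.mp hr; have := h s hs
      cases s with
      | nil => simp only [List.length_nil] at this; omega
      | cons a t => simp only [List.tail_cons]; simp only [List.length_cons] at this; omega)]
    rw [List.range_succ_eq_map]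
    simp only [List.map_cons, List.map_map]
    congr 1
    · apply List.map_congr_left
      intro r hr
      have := h r hr
      cases r with
      | nil => simp only [List.length_nil] at this; omega
      | cons a t => simp
    · apply List.map_congr_left
      intro j hj
      simp only [Function.comp_def]
      apply List.map_congr_left
      intro r hr
      have := h r hr
      cases r with
      | nil => simp only [List.length_nil] at this; omega
      | cons a t => simp

theorem setlen_one (x : Int) (l : List Int) :
    ((PySem.Set.ofList (x :: l)).length == 1) = true ↔ ∀ y ∈ l, y = x := by
  rw [← PySem.List.dedup_eq_ofList]
  constructor
  · intro h y hy
    rw [beq_iff_eq, List.length_eq_one_iff] at h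
    obtain ⟨a, ha⟩ := h
    have hx : x ∈ PySem.List.dedup (x :: l) := by rw [PySem.List.mem_dedup]; simp
    have hyd : y ∈ PySem.List.dedup (x :: l) := by rw [PySem.List.mem_dedup]; simp [hy]
    rw [ha] at hx hyd
    simp at hx hyd; omega
  · intro h
    have : PySem.List.dedup (x :: l) = [x] := by
      have hnd := PySem.List.nodup_dedup (x :: l)
      have hmem : ∀ y ∈ PySem.List.dedup (x :: l), y = x := by
        intro y hy; rw [PySem.List.mem_dedup] at hy
        rcases List.mem_cons.mp hy with h0 | h0
        · exact h0
        · exact h y h0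
      have hx : x ∈ PySem.List.dedup (x :: l) := by rw [PySem.List.mem_dedup]; simp
      cases hd : PySem.List.dedup (x :: l) with
      | nil => rw [hd] at hx; simp at hx
      | cons a t =>
        rw [hd] at hmem hnd hx
        have ha : a = x := hmem a (by simp)
        cases ht : t with
        | nil => rw [ha]
        | cons b u =>
          exfalso
          have hb : b = x := hmem b (by simp [ht])
          rw [ht] at hnd
          simp [ha, hb] at hnd
    rw [this]; rfl

theorem chain_iff_all_head (grid : List (List Int)) (j : Nat) :
    (∀ (i : Nat) (hi : i < grid.length), 0 < i →
        grid[i].getD j 0 = (grid[i-1]'(by omega)).getD j 0)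
    ↔ (∀ (i : Nat) (hi : i < grid.length), grid[i].getD j 0 = (grid.headD []).getD j 0) := by
  constructor
  · intro h i
    induction i with
    | zero =>
      intro hi
      cases grid with
      | nil => simp at hi
      | cons r t => simp
    | succ k ihk =>
      intro hi
      have := h (k+1) hi (by omega)
      simp only [Nat.add_sub_cancel] at this
      rw [this, ihk (by omega)]
  · intro h i hi hip
    rw [h i hi, h (i-1) (by omega)]

theorem A_iff (r : List Int) (t : List (List Int))
    (h2 : ∀ row ∈ r :: t, r.length ≤ row.length) :
    satisfiesConditions (r :: t) = true ↔ Qgrid (r :: t) r.length := by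
  have hsplit : satisfiesConditions (r :: t) =
      ((pvZipStar r.length (r :: t)).all (fun c => (PySem.Set.ofList c).length == 1) &&
       (r :: t).all (fun i =>
        (PySem.List.pyRange 0 ((r.length : Int) - 1) 1).all (fun j =>
          !(PySem.List.pyGetD i j 0 == PySem.List.pyGetD i (j + 1) 0)))) := by
    unfold satisfiesConditions
    rw [PySem.List.pyGet?_zero_cons]
    cases h : (pvZipStar r.length (r :: t)).all (fun c => (PySem.Set.ofList c).length == 1) <;>
      simp [h]
  rw [hsplit, Bool.and_eq_true]
  rw [zipStar_rect r.length (r :: t) h2]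
  constructor
  · rintro ⟨hcols, hrows⟩ i hi j hj
    refine ⟨?_, ?_⟩
    · intro hip
      -- column condition from hcols
      rw [List.all_eq_true] at hcols
      have hc := hcols _ (List.mem_map.mpr ⟨j, List.mem_range.mpr hj, rfl⟩)
      simp only [List.map_cons] at hc
      rw [setlen_one] at hc
      have hall : ∀ (i' : Nat) (hi' : i' < (r :: t).length),
          (r :: t)[i'].getD j 0 = ((r :: t).headD []).getD j 0 := by
        intro i' hi'
        cases i' with
        | zero => simp
        | succ k =>
          have hk : k < t.length := by simpa using hi'
          have := hc (t[k].getD j 0) (List.mem_map.mpr ⟨t[k], List.getElem_mem hk, rfl⟩)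
          simpa using this
      exact (chain_iff_all_head (r :: t) j).mpr hall i hi hip
    · intro hjp
      rw [List.all_eq_true] at hrows
      have hr := hrows _ (List.getElem_mem hi)
      rw [List.all_eq_true] at hr
      have hlen : r.length ≤ (r :: t)[i].length := h2 _ (List.getElem_mem hi)
      have hmem : ((j - 1 : Nat) : Int) ∈ PySem.List.pyRange 0 ((r.length : Int) - 1) 1 := by
        rw [PySem.List.mem_pyRange_one]; omega
      have := hr _ hmem
      simp only [Bool.not_eq_true', beq_eq_false_iff_ne, ne_eq] at this
      have e1 : ((j - 1 : Nat) : Int) + 1 = ((j : Nat) : Int) := by omega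
      rw [e1, PySem.List.pyGetD_natCast, PySem.List.pyGetD_natCast] at this
      rw [List.getD_eq_getElem _ _ (by omega), List.getD_eq_getElem _ _ (by omega)] at this ⊢
      exact fun hEq => this hEq.symm
  · intro hq
    refine ⟨?_, ?_⟩
    · rw [List.all_eq_true]
      intro c hc
      obtain ⟨j, hj, rfl⟩ := List.mem_map.mp hc
      rw [List.mem_range] at hj
      simp only [List.map_cons]
      rw [setlen_one]
      intro y hy
      obtain ⟨row, hrow, rfl⟩ := List.mem_map.mp hy
      obtain ⟨k, hk, rfl⟩ := List.getElem_of_mem hrow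
      have hall := (chain_iff_all_head (r :: t) j).mp
        (fun i' hi' hip => ((hq i' hi' j hj).1 hip))
      have := hall (k+1) (by simpa using Nat.succ_lt_succ hk)
      simpa using this
    · rw [List.all_eq_true]
      intro row hrow
      rw [List.all_eq_true]
      intro x hx
      rw [PySem.List.mem_pyRange_one] at hx
      obtain ⟨i, hi, rfl⟩ := List.getElem_of_mem hrow
      have hlen : r.length ≤ (r :: t)[i].length := h2 _ (List.getElem_mem hi)
      have hj : x.toNat + 1 < r.length := by omega
      have hq2 := (hq i hi (x.toNat + 1) hj).2 (by omega)
      simp only [Bool.not_eq_true', beq_eq_false_iff_ne, ne_eq]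
      have e1 : x = ((x.toNat : Nat) : Int) := by omega
      have e2 : x + 1 = (((x.toNat + 1 : Nat)) : Int) := by omega
      rw [e2, PySem.List.pyGetD_natCast]
      rw [e1, PySem.List.pyGetD_natCast]
      have e3 : x.toNat + 1 - 1 = x.toNat := by omega
      rw [e3] at hq2
      rw [List.getD_eq_getElem _ _ (by omega), List.getD_eq_getElem _ _ (by omega)] at hq2 ⊢
      exact fun hEq => hq2 hEq.symm

-- ===== VERDICT (by name: the statement is the Claim_ definition above) =====
theorem satisfiesConditions_spec : Claim_equal_satisfiesConditions := by
  intro grid _hdom hpre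
  unfold Spec_satisfiesConditions
  obtain ⟨h1, h2⟩ := hpre
  cases grid with
  | nil => exact absurd rfl h1
  | cons r t =>
    have h2' : ∀ row ∈ r :: t, r.length ≤ row.length := by simpa using h2
    exact Bool.eq_iff_iff.mpr ((A_iff r t h2').trans (altB_iff r t h2').symm)
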